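-- pv_equiv track=rewrite | github.com/UniSurreyIoT/SAX-LDA | RuleEngine/genericRule.py | has_downward_peak
-- ===== SOURCE A (Python) =====
-- def has_downward_peak(pattern):
--     going_down = pattern[0]>pattern[1]
--     if not going_down:
--         return going_down
--     for i in range(0, len(pattern)-1):
--         if going_down:
--             if pattern[i]<pattern[i+1]:
--                 going_down = False
--             else:
--                 continue
--         else:
--             if pattern[i]<pattern[i+1]:
--                 continue
--             else:
--                 return False
--     return not going_down
-- ===== SOURCE B (Python) =====
-- def has_downward_peak(pattern):
--     # Declarative characterization (no state machine): the pattern is a downward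
--     # peak iff the first step is strictly down, the last step is strictly up,
--     # and no up-step is ever followed by a non-up step.
--     if not pattern[0] > pattern[1]:
--         return False
--     n = len(pattern)
--     return pattern[n - 2] < pattern[n - 1] and all(
--         not (pattern[i] < pattern[i + 1]) or pattern[i + 1] < pattern[i + 2]
--         for i in range(n - 2))
-- ===== Notes on version B (the rewrite author's own statement) =====
-- stated objective: simpler
-- what changed: Replaces A's sequential state-machine loop (carrying a going_down flag with early return) by a stateless declarative characterization: first step strictly down, last step strictly up, and no up-step is followed by a non-up step, checked by independent per-index window tests.
import Mathlib
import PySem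

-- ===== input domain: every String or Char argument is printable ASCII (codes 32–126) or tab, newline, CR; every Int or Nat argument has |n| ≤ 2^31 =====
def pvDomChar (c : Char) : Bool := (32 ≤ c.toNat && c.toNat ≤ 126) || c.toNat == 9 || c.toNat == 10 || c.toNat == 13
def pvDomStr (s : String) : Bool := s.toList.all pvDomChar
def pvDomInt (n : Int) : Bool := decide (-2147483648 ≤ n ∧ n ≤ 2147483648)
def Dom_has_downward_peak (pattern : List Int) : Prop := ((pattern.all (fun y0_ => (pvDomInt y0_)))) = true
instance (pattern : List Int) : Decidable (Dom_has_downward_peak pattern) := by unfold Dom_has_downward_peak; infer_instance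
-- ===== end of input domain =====

-- B replaces A's going_down state-machine loop by a stateless declarative
-- characterization (first step down, last step up, no up-step followed by a
-- non-up step): simpler.

-- shared tiny helper: "step i goes strictly up", i.e. pattern[i] < pattern[i+1]
-- (indices used by both programs are in range under Pre_, so getD is exact)
def upAt (pattern : List Int) (i : Nat) : Bool :=
  decide (pattern.getD i 0 < pattern.getD (i+1) 0)

-- ===== PORT A =====
-- loop body of A's for-loop; state none = the early 'return False' was taken,
-- some gd = current value of going_down.
def aStep (pattern : List Int) (st : Option Bool) (i : Nat) : Option Bool :=
  match st with
  | none => none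
  | some gd =>
    if gd then
      if upAt pattern i then some false else some gd
    else
      if upAt pattern i then some gd else none

-- the code after the loop: early return gives False, otherwise 'return not going_down'
def aFinish : Option Bool → Bool
  | none => false
  | some gd => !gd

def has_downward_peak (pattern : List Int) : Bool :=
  -- pattern[0] > pattern[1]: Python raises IndexError when len < 2 (excluded by Pre_)
  let going_down := decide (pattern.getD 0 0 > pattern.getD 1 0)
  if !going_down then going_down
  else aFinish ((List.range (pattern.length - 1)).foldl (aStep pattern) (some going_down))

-- ===== PORT B =====
def has_downward_peak_alt (pattern : List Int) : Bool :=
  -- guard: if not pattern[0] > pattern[1]: return False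
  if !decide (pattern.getD 1 0 < pattern.getD 0 0) then false
  else
    -- pattern[n-2] < pattern[n-1] and all(not up(i) or up(i+1) for i in range(n-2))
    let n := pattern.length
    upAt pattern (n - 2) &&
      (List.range (n - 2)).all (fun i => !upAt pattern i || upAt pattern (i+1))

-- ===== PRECONDITION & SPEC =====
-- Python A evaluates pattern[0] and pattern[1] unconditionally, raising IndexError
-- on lists of length < 2; exactly those inputs are excluded.
def Pre_has_downward_peak (pattern : List Int) : Prop := 2 ≤ pattern.length
instance (pattern : List Int) : Decidable (Pre_has_downward_peak pattern) := by
  unfold Pre_has_downward_peak; infer_instance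

def pvWitness_has_downward_peak : List Int := [3, 1, 2]

def Spec_has_downward_peak (pattern : List Int) (out : Bool) : Prop := out = has_downward_peak_alt pattern
instance (pattern : List Int) (out : Bool) : Decidable (Spec_has_downward_peak pattern out) := by unfold Spec_has_downward_peak; infer_instance

-- ===== CLAIM (what is proved, stated in full; the proofs are below) =====
def Claim_equal_has_downward_peak : Prop := ∀ (pattern : List Int), Dom_has_downward_peak pattern → Pre_has_downward_peak pattern → Spec_has_downward_peak pattern (has_downward_peak pattern)

-- ===== LEMMAS AND PROOFS =====

-- A's loop started in state 'going_down = False' checks that every remaining step is up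
theorem loopA_false (pattern : List Int) :
    ∀ (k i : Nat),
      aFinish ((List.range' i k).foldl (aStep pattern) (some false)) =
        (List.range' i k).all (upAt pattern) := by
  intro k
  induction k with
  | zero => intro i; rfl
  | succ k ih =>
    intro i
    rw [List.range'_succ]
    simp only [List.foldl_cons, List.all_cons]
    by_cases h : upAt pattern i = true
    · rw [show aStep pattern (some false) i = some false from by
        simp only [aStep]; rw [if_neg Bool.false_ne_true, if_pos h], ih, h, Bool.true_and]
    · have hn : upAt pattern i = false := by simpa using h
      rw [show aStep pattern (some false) i = none from by
        simp only [aStep]; rw [if_neg Bool.false_ne_true, if_neg h], hn, Bool.false_and]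
      induction (List.range' (i+1) k) with
      | nil => rfl
      | cons x xs ih2 => simpa [aStep] using ih2

-- chain lemma: given step i is up, 'all steps i+1..i+k are up' is the same as
-- 'step i+k is up and each up step among i..i+k-1 is followed by an up step'
theorem chain (pattern : List Int) :
    ∀ (k i : Nat), upAt pattern i = true →
      (List.range' (i+1) k).all (upAt pattern) =
        (upAt pattern (i+k) && (List.range' i k).all (fun j => !upAt pattern j || upAt pattern (j+1))) := by
  intro k
  induction k with
  | zero => intro i hi; simp [hi]
  | succ k ih =>
    intro i hi
    rw [List.range'_succ, List.range'_succ]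
    simp only [List.all_cons, hi, Bool.not_true, Bool.false_or]
    by_cases h : upAt pattern (i+1) = true
    · rw [h, Bool.true_and, Bool.true_and, ih (i+1) h,
        show i + (k+1) = (i+1) + k from by omega]
    · have hn : upAt pattern (i+1) = false := by simpa using h
      simp [hn]

-- A's loop started in state 'going_down = True' over steps i..i+k equals
-- 'last step up and no up step followed by a non-up step'
theorem loopA_true (pattern : List Int) :
    ∀ (k i : Nat),
      aFinish ((List.range' i (k+1)).foldl (aStep pattern) (some true)) =
        (upAt pattern (i+k) && (List.range' i k).all (fun j => !upAt pattern j || upAt pattern (j+1))) := by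
  intro k
  induction k with
  | zero =>
    intro i
    simp only [List.range', List.foldl_cons, List.foldl_nil, Nat.add_zero]
    by_cases h : upAt pattern i = true
    · rw [show aStep pattern (some true) i = some false from by
        simp [aStep, h], h]
      rfl
    · have hn : upAt pattern i = false := by simpa using h
      rw [show aStep pattern (some true) i = some true from by
        simp [aStep, hn], hn]
      rfl
  | succ k ih =>
    intro i
    rw [List.range'_succ]
    simp only [List.foldl_cons]
    by_cases h : upAt pattern i = true
    · -- turning point: A switches to going_down = False
      rw [show aStep pattern (some true) i = some false from by
        simp [aStep, h],
        loopA_false, chain pattern (k+1) i h]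
    · -- still descending
      have hn : upAt pattern i = false := by simpa using h
      rw [show aStep pattern (some true) i = some true from by
        simp [aStep, hn], ih (i+1),
        List.range'_succ]
      simp only [List.all_cons, hn, Bool.not_false, Bool.true_or, Bool.true_and,
        show i + (k+1) = (i+1) + k from by omega]

-- ===== VERDICT (by name: the statement is the Claim_ definition above) =====
theorem has_downward_peak_spec : Claim_equal_has_downward_peak := by
  intro pattern _ hpre
  unfold Spec_has_downward_peak has_downward_peak has_downward_peak_alt
  have hn : 2 ≤ pattern.length := hpre
  rcases Bool.eq_false_or_eq_true (decide (pattern.getD 1 0 < pattern.getD 0 0)) with hb | hb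
  · simp only [gt_iff_lt, hb, Bool.not_true, Bool.false_eq_true, if_false]
    have hk : pattern.length - 1 = (pattern.length - 2) + 1 := by omega
    rw [List.range_eq_range', hk, loopA_true pattern (pattern.length - 2) 0,
      List.range_eq_range']
    simp
  · simp only [gt_iff_lt, hb]
    rfl
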